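-- pv_equiv track=rewrite | github.com/Theis-Mathiassen/Grover | oracle_finder.py | number_to_binary_array
-- ===== SOURCE A (Python) =====
-- def number_to_binary_array(number, array_size):
--   """
--   Converts a number into a fixed-size array (list) of binary integers.
--
--   Args:
--     number: The integer to convert.
--     array_size: The desired size of the output binary array.
--
--   Returns:
--     A list of integers (0s and 1s) representing the binary number,
--     padded with leading zeros to fit the array_size.
--     Returns an error message string if the binary representation exceeds array_size.
--   """
--   if not isinstance(number, int) or not isinstance(array_size, int):
--     return "Error: Both number and array_size must be integers."
--   if number < 0:
--     return "Error: Number must be non-negative for this conversion."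
--   if array_size <= 0:
--     return "Error: array_size must be a positive integer."
--
--   # 1. Convert to binary string and 2. remove "0b" prefix
--   binary_string = bin(number)[2:]
--
--   # Check if the binary representation is too large for the array_size
--   if len(binary_string) > array_size:
--     return f"Error: Binary representation of {number} ({binary_string}) exceeds array_size of {array_size}."
--
--   # 3. Pad with leading zeros
--   padded_binary_string = binary_string.zfill(array_size)
--
--   # 4. Convert each character to an integer and 5. store in a list
--   binary_array = [int(bit) for bit in padded_binary_string]
--
--   return binary_array
-- ===== SOURCE B (Python) =====
-- def number_to_binary_array(number, array_size):
--   if not isinstance(number, int) or not isinstance(array_size, int):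
--     return "Error: Both number and array_size must be integers."
--   if number < 0:
--     return "Error: Number must be non-negative for this conversion."
--   if array_size <= 0:
--     return "Error: array_size must be a positive integer."
--   if number >= (1 << array_size):
--     return f"Error: Binary representation of {number} ({bin(number)[2:]}) exceeds array_size of {array_size}."
--   return [(number >> (array_size - 1 - i)) & 1 for i in range(array_size)]
-- ===== Notes on version B (the rewrite author's own statement) =====
-- stated objective: simpler
-- what changed: Replaces A's string pipeline (bin(), strip '0b', zfill, int() per character) by direct arithmetic bit extraction: an overflow test number >= 1 << array_size and a shift-and-mask comprehension [(number >> (array_size-1-i)) & 1 for i in range(array_size)].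
import Mathlib
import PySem

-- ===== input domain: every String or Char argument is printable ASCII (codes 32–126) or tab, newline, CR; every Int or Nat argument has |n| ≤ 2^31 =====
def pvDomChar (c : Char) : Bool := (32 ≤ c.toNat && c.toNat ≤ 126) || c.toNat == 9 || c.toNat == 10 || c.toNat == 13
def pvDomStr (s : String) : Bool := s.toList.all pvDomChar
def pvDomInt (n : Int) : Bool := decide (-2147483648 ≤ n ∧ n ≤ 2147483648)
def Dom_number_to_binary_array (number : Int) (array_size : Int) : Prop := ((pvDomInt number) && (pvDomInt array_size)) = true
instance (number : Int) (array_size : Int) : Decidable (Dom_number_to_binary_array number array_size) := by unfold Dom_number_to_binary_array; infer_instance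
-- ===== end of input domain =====

-- B replaces A's string pipeline (bin / zfill / int-per-char) by direct shift-and-mask bit
-- extraction; objective: simpler (no measured speedup claimed).

-- ===== PORT A =====
-- A returns error STRINGS (not a list) on the guard/overflow branches; those inputs are
-- outside Pre_ and the port returns [] there.
def number_to_binary_array (number : Int) (array_size : Int) : List Int :=
  if number < 0 then []
  else if array_size ≤ 0 then []
  else
    let binaryString := PySem.Int.toBinChars number        -- bin(number)[2:]
    if (binaryString.length : Int) > array_size then []
    else
      let paddedBinaryString := PySem.Chars.zfill binaryString array_size
      paddedBinaryString.map (fun bit => (PySem.Int.ofChars? [bit]).getD 0)   -- int(bit)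

-- ===== PORT B =====
def number_to_binary_array_alt (number : Int) (array_size : Int) : List Int :=
  if number < 0 then []
  else if array_size ≤ 0 then []
  else if (1 : Int) <<< array_size.toNat ≤ number then []   -- number >= (1 << array_size)
  else
    (PySem.List.pyRange 0 array_size 1).map
      (fun i => PySem.Int.band (number >>> (array_size - 1 - i).toNat) 1)

-- ===== PRECONDITION & SPEC =====
-- Pre_ excludes exactly the inputs on which A returns an error STRING instead of a list
-- (negative number, non-positive array_size, or binary representation longer than array_size).
def Pre_number_to_binary_array (number : Int) (array_size : Int) : Prop :=
  0 ≤ number ∧ 0 < array_size ∧ number < 2 ^ array_size.toNat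
instance (number : Int) (array_size : Int) : Decidable (Pre_number_to_binary_array number array_size) := by unfold Pre_number_to_binary_array; infer_instance
def pvWitness_number_to_binary_array : Int × Int := (5, 4)
def Spec_number_to_binary_array (number : Int) (array_size : Int) (out : List Int) : Prop := out = number_to_binary_array_alt number array_size
instance (number : Int) (array_size : Int) (out : List Int) : Decidable (Spec_number_to_binary_array number array_size out) := by unfold Spec_number_to_binary_array; infer_instance

-- ===== CLAIM (what is proved, stated in full; the proofs are below) =====
def Claim_equal_number_to_binary_array : Prop := ∀ (number : Int) (array_size : Int), Dom_number_to_binary_array number array_size → Pre_number_to_binary_array number array_size → Spec_number_to_binary_array number array_size (number_to_binary_array number array_size)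

-- ===== LEMMAS AND PROOFS =====

/-- The big-endian width-`s` bit list both programs produce. -/
def bitsBE (s n : Nat) : List Int :=
  (List.range s).map (fun i => ((n / 2 ^ (s - 1 - i) % 2 : Nat) : Int))

lemma bitsBE_zero (s : Nat) : bitsBE s 0 = List.replicate s 0 := by
  simp [bitsBE]

lemma bitsBE_succ (s n : Nat) :
    bitsBE (s + 1) n = bitsBE s (n / 2) ++ [((n % 2 : Nat) : Int)] := by
  unfold bitsBE
  rw [List.range_succ, List.map_append]
  congr 1
  · apply List.map_congr_left
    intro i hi
    rw [List.mem_range] at hi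
    have h1 : s + 1 - 1 - i = (s - 1 - i) + 1 := by omega
    rw [h1, pow_succ, mul_comm, ← Nat.div_div_eq_div_mul]
  · simp

lemma mem_toDigits_two (n : Nat) : ∀ c ∈ Nat.toDigits 2 n, c = '0' ∨ c = '1' := by
  induction n using Nat.strong_induction_on with
  | _ n ih =>
    rw [Nat.toDigits_eq_if (by norm_num)]
    split
    · rename_i h
      intro c hc
      rw [List.mem_singleton] at hc
      subst hc
      interval_cases n
      · left; rfl
      · right; rfl
    · rename_i h
      intro c hc
      rw [List.mem_append] at hc
      rcases hc with hc | hc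
      · exact ih (n / 2) (by omega) c hc
      · rw [List.mem_singleton] at hc
        subst hc
        have : n % 2 = 0 ∨ n % 2 = 1 := by omega
        rcases this with h2 | h2 <;> rw [h2] <;> decide

lemma zfill_no_sign (cs : List Char) (w : Int) (hmem : ∀ c ∈ cs, c = '0' ∨ c = '1') :
    PySem.Chars.zfill cs w = List.replicate (w.toNat - cs.length) '0' ++ cs := by
  unfold PySem.Chars.zfill
  split
  · rename_i h
    have : w.toNat - cs.length = 0 := by omega
    rw [this]
    simp
  · cases cs with
    | nil => simp
    | cons c rest =>
      have hc := hmem c (List.mem_cons_self ..)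
      have hns : ¬ (c = '+' ∨ c = '-') := by
        rcases hc with h | h <;> subst h <;> decide
      dsimp only
      rw [if_neg hns]

lemma pad_toDigits (s : Nat) : ∀ n : Nat, 0 < s → n < 2 ^ s →
    (List.replicate (s - (Nat.toDigits 2 n).length) '0' ++ Nat.toDigits 2 n).map
      (fun bit => (PySem.Int.ofChars? [bit]).getD 0) = bitsBE s n := by
  induction s with
  | zero => intro n hs; omega
  | succ s ih =>
    intro n _ hn
    by_cases h2 : n < 2
    · interval_cases n
      · rw [Nat.toDigits_zero, bitsBE_succ, bitsBE_zero]
        have f0 : (PySem.Int.ofChars? ['0']).getD 0 = 0 := by decide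
        simp [f0]
      · rw [Nat.toDigits_of_lt_base (by norm_num), bitsBE_succ, bitsBE_zero]
        have f1 : (PySem.Int.ofChars? [Nat.digitChar 1]).getD 0 = 1 := by decide
        have f0 : (PySem.Int.ofChars? ['0']).getD 0 = 0 := by decide
        simp [f0, f1]
    · have hd := Nat.toDigits_of_base_le (b := 2) (n := n) (by norm_num) (by omega)
      have hs' : 0 < s := by
        rcases Nat.eq_zero_or_pos s with h | h
        · subst h; norm_num at hn; omega
        · exact h
      have hlt : n / 2 < 2 ^ s := by
        rw [Nat.div_lt_iff_lt_mul (by norm_num)]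
        rw [pow_succ] at hn
        exact hn
      rw [hd, bitsBE_succ]
      have hlen : s + 1 - (Nat.toDigits 2 (n / 2) ++ [(n % 2).digitChar]).length
          = s - (Nat.toDigits 2 (n / 2)).length := by
        simp
      rw [hlen, ← List.append_assoc, List.map_append, ih (n / 2) hs' hlt]
      congr 1
      have : n % 2 = 0 ∨ n % 2 = 1 := by omega
      rcases this with h | h <;> rw [h] <;> decide

lemma band_shift_one (m k : Nat) :
    PySem.Int.band ((m : Int) >>> k) 1 = ((m / 2 ^ k % 2 : Nat) : Int) := by
  rw [← Int.natCast_shiftRight]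
  rw [show (1 : Int) = ((1 : Nat) : Int) from rfl, PySem.Int.band_natCast]
  rw [Nat.shiftRight_eq_div_pow, Nat.and_one_is_mod]

-- ===== VERDICT (by name: the statement is the Claim_ definition above) =====
theorem number_to_binary_array_spec : Claim_equal_number_to_binary_array := by
  intro number array_size _ hpre
  obtain ⟨h1, h2, h3⟩ := hpre
  unfold Spec_number_to_binary_array
  set s : Nat := array_size.toNat with hs
  have hsz : array_size = (s : Int) := by omega
  set n : Nat := number.toNat with hn
  have hnum : number = (n : Int) := by omega
  have hlt : n < 2 ^ s := by
    have := h3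
    rw [hnum] at this
    exact_mod_cast this
  -- evaluate A
  have hA : number_to_binary_array number array_size =
      (List.replicate (s - (Nat.toDigits 2 n).length) '0' ++ Nat.toDigits 2 n).map
        (fun bit => (PySem.Int.ofChars? [bit]).getD 0) := by
    unfold number_to_binary_array
    rw [if_neg (by omega), if_neg (by omega)]
    have hbin : PySem.Int.toBinChars number = Nat.toDigits 2 n := by
      unfold PySem.Int.toBinChars
      rw [if_neg (by omega)]
    simp only [hbin]
    have hlen : (Nat.toDigits 2 n).length ≤ s :=
      Nat.toDigits_length 2 n s (by omega) hlt
    rw [if_neg (by omega)]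
    rw [zfill_no_sign _ _ (mem_toDigits_two n)]
  -- evaluate B
  have hB : number_to_binary_array_alt number array_size = bitsBE s n := by
    unfold number_to_binary_array_alt
    rw [if_neg (by omega), if_neg (by omega)]
    have h2s : (1 : Int) <<< s = 2 ^ s := by simp [Int.shiftLeft_eq]
    have hov : ¬ ((1 : Int) <<< s ≤ number) := by
      rw [h2s]
      exact not_le.mpr h3
    rw [if_neg hov]
    rw [PySem.List.pyRange_one, List.map_map]
    have hrange : (array_size - 0).toNat = s := by omega
    rw [hrange]
    unfold bitsBE
    apply List.map_congr_left
    intro k hk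
    rw [List.mem_range] at hk
    simp only [Function.comp]
    have hidx : (array_size - 1 - (0 + (k : Int))).toNat = s - 1 - k := by omega
    rw [hidx, hnum, band_shift_one]
  rw [hA, hB, pad_toDigits s n (by omega) hlt]
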